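-- pv_equiv track=rewrite | github.com/Kirankavala143/Dsa-codes | ba.py | find_highest_lowest_frequency
-- ===== SOURCE A (Python) =====
-- def find_highest_lowest_frequency(arr):
--     frequency = {}
--     for num in arr:
--         if num in frequency:
--             frequency[num] += 1
--         else:
--             frequency[num] = 1
--
--     highest_freq = max(frequency.values())
--     lowest_freq = min(frequency.values())
--
--     highest_freq_elements = [num for num, freq in frequency.items() if freq == highest_freq]
--     lowest_freq_elements = [num for num, freq in frequency.items() if freq == lowest_freq]
--
--     return highest_freq_elements, lowest_freq_elements
-- ===== SOURCE B (Python) =====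
-- def find_highest_lowest_frequency(arr):
--     frequency = {}
--     for num in arr:
--         frequency[num] = frequency.get(num, 0) + 1
--
--     buckets = {}
--     for num, freq in frequency.items():
--         buckets.setdefault(freq, []).append(num)
--
--     hi = max(buckets)
--     lo = min(buckets)
--     return buckets[hi], buckets[lo]
-- ===== Notes on version B (the rewrite author's own statement) =====
-- stated objective: alternative
-- what changed: Instead of computing the max/min frequency and then filtering the items twice, B builds an inverted index from frequency to the list of elements with that frequency in one grouping pass and returns the buckets at the max and min keys.
import Mathlib
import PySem

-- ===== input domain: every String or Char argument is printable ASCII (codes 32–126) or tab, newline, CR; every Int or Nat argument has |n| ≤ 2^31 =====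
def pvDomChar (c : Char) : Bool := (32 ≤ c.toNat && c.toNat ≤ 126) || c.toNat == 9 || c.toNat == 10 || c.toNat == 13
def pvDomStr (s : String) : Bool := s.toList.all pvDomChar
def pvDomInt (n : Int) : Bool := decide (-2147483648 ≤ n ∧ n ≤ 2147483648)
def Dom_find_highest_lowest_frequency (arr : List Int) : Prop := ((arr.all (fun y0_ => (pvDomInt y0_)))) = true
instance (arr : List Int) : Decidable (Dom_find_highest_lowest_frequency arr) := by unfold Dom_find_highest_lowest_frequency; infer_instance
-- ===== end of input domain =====

-- B replaces A's compute-extremes-then-filter-twice structure by one grouping pass into an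
-- inverted index (frequency → elements) plus two keyed lookups; same asymptotic cost.

-- ===== PORT A =====
def find_highest_lowest_frequency (arr : List Int) : List Int × List Int :=
  let frequency : PySem.Dict Int Int :=
    arr.foldl (fun d num =>
      if d.contains num then d.modify num 0 (· + 1) else d.insert num 1) PySem.Dict.empty
  let highest_freq : Int := ((PySem.List.max? frequency.values (fun v => v)).getD 0)
  let lowest_freq : Int := ((PySem.List.min? frequency.values (fun v => v)).getD 0)
  let highest_freq_elements := (frequency.items.filter (fun p => p.2 == highest_freq)).map (·.1)
  let lowest_freq_elements := (frequency.items.filter (fun p => p.2 == lowest_freq)).map (·.1)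
  (highest_freq_elements, lowest_freq_elements)

-- ===== PORT B =====
def find_highest_lowest_frequency_alt (arr : List Int) : List Int × List Int :=
  let frequency : PySem.Dict Int Int :=
    arr.foldl (fun d num => d.insert num (d.getD num 0 + 1)) PySem.Dict.empty
  let buckets : PySem.Dict Int (List Int) :=
    frequency.items.foldl (fun b p => b.modify p.2 [] (· ++ [p.1])) PySem.Dict.empty
  let hi : Int := ((PySem.List.max? buckets.keys (fun v => v)).getD 0)
  let lo : Int := ((PySem.List.min? buckets.keys (fun v => v)).getD 0)
  (buckets.getD hi [], buckets.getD lo [])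

-- ===== PRECONDITION & SPEC =====
-- Pre_ excludes only the empty list, on which A raises ValueError (max() of an empty sequence).
def Pre_find_highest_lowest_frequency (arr : List Int) : Prop := arr ≠ []
instance (arr : List Int) : Decidable (Pre_find_highest_lowest_frequency arr) := by unfold Pre_find_highest_lowest_frequency; infer_instance
def pvWitness_find_highest_lowest_frequency : List Int := [1, 2, 2]
def Spec_find_highest_lowest_frequency (arr : List Int) (out : List Int × List Int) : Prop := out = find_highest_lowest_frequency_alt arr
instance (arr : List Int) (out : List Int × List Int) : Decidable (Spec_find_highest_lowest_frequency arr out) := by unfold Spec_find_highest_lowest_frequency; infer_instance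

-- ===== CLAIM (what is proved, stated in full; the proofs are below) =====
def Claim_equal_find_highest_lowest_frequency : Prop := ∀ (arr : List Int), Dom_find_highest_lowest_frequency arr → Pre_find_highest_lowest_frequency arr → Spec_find_highest_lowest_frequency arr (find_highest_lowest_frequency arr)

-- ===== LEMMAS AND PROOFS =====

-- A's 'absent' branch coincides with Counter's modify step.
theorem mod_ins (d : PySem.Dict Int Int) (x : Int) (h : d.contains x = false) :
    d.modify x 0 (· + 1) = d.insert x 1 := by
  have h2 : d.get? x = none := (PySem.Dict.get?_eq_none_iff_contains d x).2 h
  have h3 : d.getD x 0 = 0 := by simp [PySem.Dict.getD_eq_get?_getD, h2]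
  simp [PySem.Dict.modify, h3]

-- A's counting loop builds Counter(arr).
theorem freqA_eq_counter (arr : List Int) :
    arr.foldl (fun d num =>
      if d.contains num then d.modify num 0 (· + 1) else d.insert num 1) PySem.Dict.empty
    = PySem.Dict.counter arr := by
  rw [PySem.Dict.counter_eq_foldl]
  congr 1
  funext d num
  by_cases h : d.contains num = true
  · simp [h]
  · simp at h; simp [h, mod_ins d num h]

-- max/min over the deduplicated values equal max/min over the values.
theorem max_ofList_eq (l : List Int) :
    PySem.List.max? (PySem.Set.ofList l) (fun v => v) = PySem.List.max? l (fun v => v) := by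
  cases l with
  | nil => rfl
  | cons x t =>
    have hne : (x :: t) ≠ ([] : List Int) := by simp
    have hne2 : (PySem.Set.ofList (x :: t)) ≠ ([] : List Int) := by
      intro h
      have := (PySem.Set.mem_ofList (x :: t) x).2 (by simp)
      rw [h] at this; simp at this
    obtain ⟨m, hm⟩ : ∃ m, PySem.List.max? (x :: t) (fun v => v) = some m := by
      rcases Option.eq_none_or_eq_some (PySem.List.max? (x :: t) (fun v => v)) with h | h
      · exact absurd ((PySem.List.max?_eq_none_iff _ _).1 h) hne
      · exact h
    obtain ⟨m', hm'⟩ : ∃ m, PySem.List.max? (PySem.Set.ofList (x :: t)) (fun v => v) = some m := by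
      rcases Option.eq_none_or_eq_some (PySem.List.max? (PySem.Set.ofList (x :: t)) (fun v => v)) with h | h
      · exact absurd ((PySem.List.max?_eq_none_iff _ _).1 h) hne2
      · exact h
    have hmem := PySem.List.max?_mem hm
    have hmem' := PySem.List.max?_mem hm'
    have hmax := PySem.List.max?_isMax hm
    have hmax' := PySem.List.max?_isMax hm'
    rw [hm, hm']
    have h1 : m ≤ m' := hmax' m ((PySem.Set.mem_ofList _ _).2 hmem)
    have h2 : m' ≤ m := hmax m' ((PySem.Set.mem_ofList _ _).1 hmem')
    exact congrArg some (le_antisymm h2 h1)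

theorem min_ofList_eq (l : List Int) :
    PySem.List.min? (PySem.Set.ofList l) (fun v => v) = PySem.List.min? l (fun v => v) := by
  cases l with
  | nil => rfl
  | cons x t =>
    have hne : (x :: t) ≠ ([] : List Int) := by simp
    have hne2 : (PySem.Set.ofList (x :: t)) ≠ ([] : List Int) := by
      intro h
      have := (PySem.Set.mem_ofList (x :: t) x).2 (by simp)
      rw [h] at this; simp at this
    obtain ⟨m, hm⟩ : ∃ m, PySem.List.min? (x :: t) (fun v => v) = some m := by
      rcases Option.eq_none_or_eq_some (PySem.List.min? (x :: t) (fun v => v)) with h | h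
      · exact absurd ((PySem.List.min?_eq_none_iff _ _).1 h) hne
      · exact h
    obtain ⟨m', hm'⟩ : ∃ m, PySem.List.min? (PySem.Set.ofList (x :: t)) (fun v => v) = some m := by
      rcases Option.eq_none_or_eq_some (PySem.List.min? (PySem.Set.ofList (x :: t)) (fun v => v)) with h | h
      · exact absurd ((PySem.List.min?_eq_none_iff _ _).1 h) hne2
      · exact h
    have hmem := PySem.List.min?_mem hm
    have hmem' := PySem.List.min?_mem hm'
    have hmin := PySem.List.min?_isMin hm
    have hmin' := PySem.List.min?_isMin hm'
    rw [hm, hm']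
    have h1 : m' ≤ m := hmin' m ((PySem.Set.mem_ofList _ _).2 hmem)
    have h2 : m ≤ m' := hmin m' ((PySem.Set.mem_ofList _ _).1 hmem')
    exact congrArg some (le_antisymm h1 h2)

-- The bucket at key c collects (in order) the first components of the items whose frequency is c.
theorem buckets_getD (items : List (Int × Int)) (c : Int) :
    (items.foldl (fun b p => b.modify p.2 [] (· ++ [p.1]))
      (PySem.Dict.empty : PySem.Dict Int (List Int))).getD c []
    = (items.filter (fun p => p.2 == c)).map (·.1) := by
  have h : items.foldl (fun b p => b.modify p.2 [] (· ++ [p.1]))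
      (PySem.Dict.empty : PySem.Dict Int (List Int))
    = (items.map (fun p => (p.2, p.1))).foldl (fun d p => d.modify p.1 [] (· ++ [p.2]))
      (PySem.Dict.empty : PySem.Dict Int (List Int)) := by
    rw [List.foldl_map]
  rw [h, PySem.Dict.getD_foldl_modify_append]
  simp [List.filter_map, Function.comp_def]

theorem buckets_keys (items : List (Int × Int)) :
    (items.foldl (fun b p => b.modify p.2 [] (· ++ [p.1]))
      (PySem.Dict.empty : PySem.Dict Int (List Int))).keys
    = PySem.Set.ofList (items.map (·.2)) := by
  rw [PySem.Dict.keys_foldl_modify_key]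
  simp [PySem.Set.update_nil_left, PySem.Dict.keys_empty]

-- ===== VERDICT (by name: the statement is the Claim_ definition above) =====
theorem find_highest_lowest_frequency_spec : Claim_equal_find_highest_lowest_frequency := by
  intro arr _ hpre
  unfold Spec_find_highest_lowest_frequency find_highest_lowest_frequency find_highest_lowest_frequency_alt
  simp only [freqA_eq_counter, PySem.Dict.foldl_insert_getD_add_one_eq_counter,
    buckets_getD, buckets_keys]
  rw [show (PySem.Dict.counter arr).items.map (·.2) = (PySem.Dict.counter arr).values from rfl,
    max_ofList_eq, min_ofList_eq]
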